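-- pv_equiv track=rewrite | github.com/LornartheBreton/final_fuentes_de_datos | Cleanupper.py | prefix_neg
-- ===== SOURCE A (Python) =====
-- def prefix_neg(words):
--     '''
--     :param words: a list of words to process.
--     :return: a list of words with the 'neg_' suffix.
--     This function receives a list of words and appends a 'neg_' suffix to every word following a negation (no, not, nor)
--     and up to the next punctuation mark (., !, ?). For example:
--     ['not', 'complex', 'example', '.', 'could', 'not', 'simpler', '!']
--     ->
--     ['not', 'neg_complex', 'neg_example', '.', 'could', 'not', 'neg_simpler', '!']
--     TODO
--     Implement prefix_neg
--     HINT: you might find the statment 'continue' useful in your implementation, althought it is not neceessary.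
--     [15 points]
--     '''
--     after_neg = False
--     proc_words = []
--     for word in words:
--         if word == 'no' or word == 'not' or word == 'nor':
--             after_neg = True
--             proc_words.append(word)
--         else:
--             if word =='.'or word == '!' or word == '?':
--                 proc_words.append(word)
--                 after_neg = False
--             else:
--                 if after_neg:
--                     proc_words.append('neg_'+word)
--                 else:
--                     proc_words.append(word)# YOUR CODE GOES HERE
--     return proc_words
-- ===== SOURCE B (Python) =====
-- NEG = {'no', 'not', 'nor'}
-- PUNCT = {'.', '!', '?'}
--
--
-- def _proc_segment(seg):
--     # segment containing no punctuation: words after the first negation get 'neg_',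
--     # except negation words themselves
--     try:
--         i = next(j for j, w in enumerate(seg) if w in NEG)
--     except StopIteration:
--         return list(seg)
--     return seg[:i + 1] + [w if w in NEG else 'neg_' + w for w in seg[i + 1:]]
--
--
-- def prefix_neg(words):
--     out = []
--     seg = []
--     for w in words:
--         if w in PUNCT:
--             out.extend(_proc_segment(seg))
--             out.append(w)
--             seg = []
--         else:
--             seg.append(w)
--     out.extend(_proc_segment(seg))
--     return out
-- ===== Notes on version B (the rewrite author's own statement) =====
-- stated objective: alternative
-- what changed: B splits the input into punctuation-free segments at the punctuation marks and transforms each segment in two phases (find first negation index, then slice and map), instead of A's single flat loop threading an after_neg boolean through every word.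
import Mathlib
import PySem

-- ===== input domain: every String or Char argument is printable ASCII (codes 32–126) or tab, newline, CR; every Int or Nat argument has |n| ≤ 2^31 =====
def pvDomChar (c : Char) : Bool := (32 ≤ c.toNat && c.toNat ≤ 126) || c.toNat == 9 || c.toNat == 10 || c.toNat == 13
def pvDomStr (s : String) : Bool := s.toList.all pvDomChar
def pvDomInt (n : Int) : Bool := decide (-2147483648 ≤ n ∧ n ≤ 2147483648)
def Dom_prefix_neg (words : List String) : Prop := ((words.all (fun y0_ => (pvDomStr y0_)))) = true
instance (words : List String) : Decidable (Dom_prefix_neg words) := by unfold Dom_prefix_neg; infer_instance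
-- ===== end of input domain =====

-- B splits the list into punctuation-delimited segments and rewrites each segment in two
-- phases (locate the first negation, then map over the tail) instead of A's flat
-- after_neg-flag loop; same cost, different decomposition.

-- ===== PORT A =====
-- the for-loop of A as structural recursion over the remaining words, state = (after_neg, proc_words)
def pvLoopA (afterNeg : Bool) (proc : List String) : List String → List String
  | [] => proc
  | word :: rest =>
    if word = "no" || word = "not" || word = "nor" then
      pvLoopA true (proc ++ [word]) rest
    else if word = "." || word = "!" || word = "?" then
      pvLoopA false (proc ++ [word]) rest
    else if afterNeg then
      pvLoopA afterNeg (proc ++ ["neg_" ++ word]) rest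
    else
      pvLoopA afterNeg (proc ++ [word]) rest

def prefix_neg (words : List String) : List String := pvLoopA false [] words

-- ===== PORT B =====
def pvIsNeg (w : String) : Bool := w = "no" || w = "not" || w = "nor"

-- Source B's _proc_segment: first negation index, then slices + map
def pvProcSeg (seg : List String) : List String :=
  match seg.findIdx? pvIsNeg with
  | none => seg
  | some i => seg.take (i + 1) ++ (seg.drop (i + 1)).map (fun w => if pvIsNeg w then w else "neg_" ++ w)

-- Source B's for-loop, state = (out, seg)
def pvLoopB (out seg : List String) : List String → List String
  | [] => out ++ pvProcSeg seg
  | w :: rest =>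
    if w = "." || w = "!" || w = "?" then
      pvLoopB (out ++ pvProcSeg seg ++ [w]) [] rest
    else
      pvLoopB out (seg ++ [w]) rest

def prefix_neg_alt (words : List String) : List String := pvLoopB [] [] words

-- ===== PRECONDITION & SPEC =====
def Spec_prefix_neg (words : List String) (out : List String) : Prop := out = prefix_neg_alt words
instance (words : List String) (out : List String) : Decidable (Spec_prefix_neg words out) := by unfold Spec_prefix_neg; infer_instance

-- ===== CLAIM (what is proved, stated in full; the proofs are below) =====
def Claim_equal_prefix_neg : Prop := ∀ (words : List String), Dom_prefix_neg words → Spec_prefix_neg words (prefix_neg words)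

-- ===== LEMMAS AND PROOFS =====

theorem pvProcSeg_cons_neg (x : String) (t : List String) (hx : pvIsNeg x = true) :
    pvProcSeg (x :: t) = x :: t.map (fun w => if pvIsNeg w then w else "neg_" ++ w) := by
  simp [pvProcSeg, List.findIdx?_cons, hx]

theorem pvProcSeg_cons_not (x : String) (t : List String) (hx : pvIsNeg x = false) :
    pvProcSeg (x :: t) = x :: pvProcSeg t := by
  simp only [pvProcSeg, List.findIdx?_cons, hx]
  cases h : t.findIdx? pvIsNeg with
  | none => simp
  | some i => simp [List.take_succ_cons, List.drop_succ_cons]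

theorem pvProcSeg_append (seg : List String) (w : String) :
    pvProcSeg (seg ++ [w]) =
      pvProcSeg seg ++ [if seg.any pvIsNeg then (if pvIsNeg w then w else "neg_" ++ w) else w] := by
  induction seg with
  | nil =>
    cases hw : pvIsNeg w <;> simp [pvProcSeg, List.findIdx?_cons, hw]
  | cons x t ih =>
    cases hx : pvIsNeg x with
    | true =>
      rw [List.cons_append, pvProcSeg_cons_neg x (t ++ [w]) hx, pvProcSeg_cons_neg x t hx]
      simp [hx]
    | false =>
      rw [List.cons_append, pvProcSeg_cons_not x (t ++ [w]) hx, pvProcSeg_cons_not x t hx]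
      simp [hx, ih]

theorem pvLoop_agree (ws : List String) : ∀ (out seg : List String),
    pvLoopA (seg.any pvIsNeg) (out ++ pvProcSeg seg) ws = pvLoopB out seg ws := by
  induction ws with
  | nil => intro out seg; rfl
  | cons w rest ih =>
    intro out seg
    by_cases hn : (w = "no" || w = "not" || w = "nor") = true
    · have hp : (w = "." || w = "!" || w = "?") = false := by
        rcases (by simpa using hn : (w = "no" ∨ w = "not") ∨ w = "nor") with (h | h) | h <;> simp [h]
      rw [pvLoopA, pvLoopB, if_pos hn, if_neg (by simp [hp])]
      have := ih out (seg ++ [w])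
      rw [pvProcSeg_append] at this
      have hneg : pvIsNeg w = true := hn
      simpa [hneg, List.any_append, hn, List.append_assoc] using this
    · rw [pvLoopA, pvLoopB, if_neg hn]
      by_cases hp : (w = "." || w = "!" || w = "?") = true
      · rw [if_pos hp, if_pos hp]
        have := ih (out ++ pvProcSeg seg ++ [w]) []
        simpa [pvProcSeg, List.append_assoc] using this
      · rw [if_neg hp, if_neg hp]
        have := ih out (seg ++ [w])
        rw [pvProcSeg_append] at this
        have hneg : pvIsNeg w = false := by simpa [pvIsNeg] using hn
        by_cases ha : seg.any pvIsNeg = true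
        · simpa [ha, hneg, List.any_append, List.append_assoc] using this
        · simp only [Bool.not_eq_true] at ha
          simpa [ha, hneg, List.any_append, List.append_assoc] using this

-- ===== VERDICT (by name: the statement is the Claim_ definition above) =====
theorem prefix_neg_spec : Claim_equal_prefix_neg := by
  intro words _
  show prefix_neg words = prefix_neg_alt words
  have := pvLoop_agree words [] []
  simpa [prefix_neg, prefix_neg_alt, pvProcSeg] using this
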